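-- pv_equiv track=rewrite | github.com/miseop25/Back_Jun_Code_Study | Programmers/기타문제/프렌즈4블록/friends4Block_ver1.py | solution
-- ===== SOURCE A (Python) =====
-- def find4Block(m, n ,board) :
--     dx = [ 0, -1, -1]
--     dy = [ -1, 0, -1]
--     delBlock = set()
--     for i in range(1, m) :
--         for j in range(1, n) :
--             flag = True
--             if board[i][j] == "X" : continue
--             comp = board[i][j]
--             for k in range(3) :
--                 x = i + dx[k]
--                 y = j + dy[k]
--                 if board[x][y] != comp :
--                     flag = False
--                     break
--             if flag :
--                 delBlock.add((i,j))
--                 for k in range(3) :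
--                     x = i + dx[k]
--                     y = j + dy[k]
--                     delBlock.add((x, y))
--     if len(delBlock) == 0 :
--         return False
--     return delBlock
--
-- def blockDown(m,n, board) :
--     for i in range(m-1) :
--         for j in range(n) :
--             if board[i+1][j] == "X" and board[i][j] != "X" :
--                 temp = []
--                 for t in range(i, -1, -1) :
--                     if board[t][j] != "X" :
--                         temp.append(board[t][j])
--                         board[t][j] = "X"
--                     else :
--                         break
--                 board[i][j] = "X"
--                 for k in range(i+1, m) :
--                     if board[k][j] != "X" :
--                         for t in range(k - len(temp), k ) :
--                             board[t][j] = temp.pop()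
--
--                         break
--                     else :
--                         board[k][j] = "X"
--                 if temp :
--                     for t in range(m- len(temp), m) :
--                         board[t][j] = temp.pop()
--
--     return board
--
-- def delectBlock(d, board) :
--     for x, y in d :
--         board[x][y] = "X"
--     return board
--
-- def solution(m, n, board):
--     answer = 0
--     game = []
--     for i in board :
--         game.append(list(i))
--
--     delList = find4Block(m,n,game)
--     if delList != False :
--         answer += len(delList)
--     while delList :
--         game = delectBlock(delList, game)
--         game = blockDown(m,n, game)
--         delList = find4Block(m,n,game)
--         if delList != False :
--             answer += len(delList)
--     return answer
-- ===== SOURCE B (Python) =====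
-- def solution(m, n, board):
--     game = [list(r) for r in board]
--     answer = 0
--     while True:
--         blocks = set()
--         for i in range(1, m):
--             for j in range(1, n):
--                 c = game[i][j]
--                 if c != "X" and c == game[i][j - 1] == game[i - 1][j] == game[i - 1][j - 1]:
--                     blocks.update([(i, j), (i, j - 1), (i - 1, j), (i - 1, j - 1)])
--         if not blocks:
--             return answer
--         answer += len(blocks)
--         for (x, y) in blocks:
--             game[x][y] = "X"
--         for j in range(n):
--             kept = [game[i][j] for i in range(m) if game[i][j] != "X"]
--             col = ["X"] * (m - len(kept)) + kept
--             for i in range(m):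
--                 game[i][j] = col[i]
--     return answer
-- ===== Notes on version B (the rewrite author's own statement) =====
-- stated objective: simpler
-- what changed: A's in-place cascading blockDown gravity (for each cell with a hole below: collect the run above, blank it, scan down for support, refill by popping) is replaced by a per-column compaction: keep each column's non-'X' values in order and pad the top with 'X'; the round loop and 2x2 scan are restructured around a plain set-returning scan instead of A's False-or-set protocol.
-- outside the precondition, e.g. on solution(2, 2, ['X', 'XX']): A returns 0, B returns 0
import Mathlib
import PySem

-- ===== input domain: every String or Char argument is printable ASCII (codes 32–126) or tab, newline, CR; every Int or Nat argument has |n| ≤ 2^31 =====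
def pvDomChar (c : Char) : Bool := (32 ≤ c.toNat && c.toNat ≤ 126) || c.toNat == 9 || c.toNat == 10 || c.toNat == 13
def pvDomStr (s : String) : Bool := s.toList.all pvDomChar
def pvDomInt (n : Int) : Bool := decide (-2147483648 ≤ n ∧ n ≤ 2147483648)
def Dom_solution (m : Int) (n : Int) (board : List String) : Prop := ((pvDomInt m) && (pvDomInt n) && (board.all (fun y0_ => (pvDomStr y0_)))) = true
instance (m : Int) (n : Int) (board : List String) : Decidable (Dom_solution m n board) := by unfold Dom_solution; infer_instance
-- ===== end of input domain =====

-- B replaces A's in-place cascading `blockDown` gravity by a per-column filter-and-pad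
-- compaction (objective: simpler); equivalence is proved on boards A accepts (Pre_solution).

-- list(range(1, k)) as Nat indices (used by both ports' scans)
def natRange1 (k : Int) : List Nat := (List.range (k - 1).toNat).map (· + 1)

-- ===== PORT A =====
-- board cell read/write: game[i][j] (indices always in range inside Pre_solution)
def gget (g : List (List Char)) (i j : Nat) : Char := (g.getD i []).getD j 'X'
def gset (g : List (List Char)) (i j : Nat) (c : Char) : List (List Char) :=
  g.set i ((g.getD i []).set j c)

-- find4Block: the raw delBlock set built by A's nested scan (dx/dy offsets in A's order)
def find4A (m n : Int) (g : List (List Char)) : PySem.Set (Nat × Nat) :=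
  (natRange1 m).foldl (fun s i =>
    (natRange1 n).foldl (fun s j =>
      if gget g i j = 'X' then s
      else
        let comp := gget g i j
        let flag := [(i, j - 1), (i - 1, j), (i - 1, j - 1)].foldl
          (fun fl (p : Nat × Nat) => if gget g p.1 p.2 ≠ comp then false else fl) true
        if flag then
          [(i, j - 1), (i - 1, j), (i - 1, j - 1)].foldl
            (fun s p => PySem.Set.add s p) (PySem.Set.add s (i, j))
        else s) s) PySem.Set.empty

-- find4Block's return value: False (none) when the set is empty
def find4BlockA (m n : Int) (g : List (List Char)) : Option (PySem.Set (Nat × Nat)) :=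
  let d := find4A m n g
  if d.length = 0 then none else some d

-- delectBlock
def delectA (d : PySem.Set (Nat × Nat)) (g : List (List Char)) : List (List Char) :=
  d.foldl (fun g p => gset g p.1 p.2 'X') g

-- blockDown helpers: column j is extracted, A's statements run on it, and it is written back
def getColM : List (List Char) → Nat → Nat → List Char
  | _, 0, _ => []
  | [], _ + 1, _ => []
  | r :: g, M + 1, j => r.getD j 'X' :: getColM g M j

def setColM : List (List Char) → Nat → Nat → List Char → List (List Char)
  | g, 0, _, _ => g
  | [], _ + 1, _, _ => []
  | r :: g, _ + 1, _, [] => r :: g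
  | r :: g, M + 1, j, v :: col => r.set j v :: setColM g M j col

-- `for t in range(i, -1, -1): if c[t] != 'X': temp.append(c[t]); c[t] = 'X' else: break`
def collectUp : List Char → Nat → List Char × List Char
  | c, 0 => if c.getD 0 'X' ≠ 'X' then ([c.getD 0 'X'], c.set 0 'X') else ([], c)
  | c, t + 1 =>
    if c.getD (t + 1) 'X' ≠ 'X' then
      let r := collectUp (c.set (t + 1) 'X') t
      (c.getD (t + 1) 'X' :: r.1, r.2)
    else ([], c)

-- `for t in range(a, k): c[t] = temp.pop()`
def popFill (c : List Char) (t k : Nat) (temp : List Char) : List Char :=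
  if t < k then popFill (c.set t (temp.getLastD 'X')) (t + 1) k temp.dropLast else c
termination_by k - t
decreasing_by omega

-- `for k in range(i+1, m): …` with its break / else, then the trailing `if temp:` fill
def kScan (M : Nat) (c : List Char) (k : Nat) (temp : List Char) : List Char :=
  if k < M then
    if c.getD k 'X' ≠ 'X' then popFill c (k - temp.length) k temp
    else kScan M (c.set k 'X') (k + 1) temp
  else if temp ≠ [] then popFill c (M - temp.length) M temp else c
termination_by M - k
decreasing_by omega

-- the body of A's (i, j) iteration in blockDown, acting on column j
def colBody (M i : Nat) (c : List Char) : List Char :=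
  if c.getD (i + 1) 'X' = 'X' ∧ c.getD i 'X' ≠ 'X' then
    let r := collectUp c i
    kScan M (r.2.set i 'X') (i + 1) r.1
  else c

def blockDownA (m n : Int) (g : List (List Char)) : List (List Char) :=
  (List.range (m - 1).toNat).foldl (fun g i =>
    (List.range n.toNat).foldl (fun g j =>
      setColM g m.toNat j (colBody m.toNat i (getColM g m.toNat j))) g) g

def lenOptA (d : Option (PySem.Set (Nat × Nat))) : Int :=
  match d with
  | none => 0
  | some s => (s.length : Int)

-- fuel for the while loop: it runs at most (number of cells) rounds (each round clears ≥ 1 cell)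
def gridCells (g : List (List Char)) : Nat := (g.map List.length).sum + 1

def loopA (m n : Int) : Nat → Int → List (List Char) → Option (PySem.Set (Nat × Nat)) → Int
  | 0, ans, _, _ => ans
  | _ + 1, ans, _, none => ans
  | f + 1, ans, g, some d =>
    let g1 := delectA d g
    let g2 := blockDownA m n g1
    let d' := find4BlockA m n g2
    loopA m n f (ans + lenOptA d') g2 d'

def solution (m : Int) (n : Int) (board : List String) : Int :=
  let g := board.map String.toList
  let d0 := find4BlockA m n g
  loopA m n (gridCells g) (lenOptA d0) g d0

-- ===== PORT B =====
-- the blocks set of one round, built with set.update as Source B does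
def findB (m n : Int) (g : List (List Char)) : PySem.Set (Nat × Nat) :=
  (natRange1 m).foldl (fun s i =>
    (natRange1 n).foldl (fun s j =>
      let c := gget g i j
      if c ≠ 'X' ∧ c = gget g i (j - 1) ∧ gget g i (j - 1) = gget g (i - 1) j ∧
          gget g (i - 1) j = gget g (i - 1) (j - 1) then
        PySem.Set.update s [(i, j), (i, j - 1), (i - 1, j), (i - 1, j - 1)]
      else s) s) PySem.Set.empty

def delectB (d : PySem.Set (Nat × Nat)) (g : List (List Char)) : List (List Char) :=
  d.foldl (fun g p => gset g p.1 p.2 'X') g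

-- per-column compaction: keep the non-'X' values, pad with 'X' on top
def gravCol (M : Nat) (c : List Char) : List Char :=
  let kept := c.filter (fun v => v != 'X')
  List.replicate (M - kept.length) 'X' ++ kept

def gravityB (m n : Int) (g : List (List Char)) : List (List Char) :=
  (List.range n.toNat).foldl (fun g j =>
    setColM g m.toNat j (gravCol m.toNat (getColM g m.toNat j))) g

def loopB (m n : Int) : Nat → Int → List (List Char) → Int
  | 0, ans, _ => ans
  | f + 1, ans, g =>
    let s := findB m n g
    if s.length = 0 then ans
    else loopB m n f (ans + (s.length : Int)) (gravityB m n (delectB s g))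

def solution_alt (m : Int) (n : Int) (board : List String) : Int :=
  let g := board.map String.toList
  loopB m n (gridCells g + 1) 0 g

-- ===== PRECONDITION & SPEC =====
-- Pre_solution excludes ragged or undersized boards (some of the first m rows missing or
-- shorter than n while m, n ≥ 2): there A's unguarded game[i][j] reads usually raise
-- IndexError, and A returns only when every scan short-circuits before an out-of-range read.
def Pre_solution (m : Int) (n : Int) (board : List String) : Prop :=
  (m ≤ 1 ∨ n ≤ 1) ∨
    (m.toNat ≤ board.length ∧ ∀ i < m.toNat, n.toNat ≤ (board.getD i "").toList.length)
instance (m : Int) (n : Int) (board : List String) : Decidable (Pre_solution m n board) := by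
  unfold Pre_solution; infer_instance

def pvWitness_solution : Int × Int × List String := (2, 2, ["AA", "AA"])

def Spec_solution (m : Int) (n : Int) (board : List String) (out : Int) : Prop :=
  out = solution_alt m n board
instance (m : Int) (n : Int) (board : List String) (out : Int) :
    Decidable (Spec_solution m n board out) := by unfold Spec_solution; infer_instance

-- ===== CLAIM (what is proved, stated in full; the proofs are below) =====
def Claim_equal_solution : Prop := ∀ (m : Int) (n : Int) (board : List String),
  Dom_solution m n board → Pre_solution m n board → Spec_solution m n board (solution m n board)

-- ===== LEMMAS AND PROOFS =====

-- ---------- column-level helpers (proof-side) ----------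

def fX (c : List Char) : List Char := c.filter (fun v => v != 'X')

def leadX : List Char → Nat
  | [] => 0
  | a :: r => if a = 'X' then leadX r + 1 else 0

def SortedUp (i : Nat) (c : List Char) : Prop :=
  ∀ t, t < i → t + 1 < c.length → c.getD t 'X' ≠ 'X' → c.getD (t + 1) 'X' ≠ 'X'

lemma gD_set_self (l : List Char) (i : Nat) (v d : Char) (h : i < l.length) :
    (l.set i v).getD i d = v := by
  simp [List.getD_eq_getElem?_getD, List.getElem?_set_self h]

lemma gD_set_ne (l : List Char) {i j : Nat} (v d : Char) (h : i ≠ j) :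
    (l.set i v).getD j d = l.getD j d := by
  simp [List.getD_eq_getElem?_getD, List.getElem?_set_ne h]

lemma getD_repl_append (s : Nat) (l : List Char) (t : Nat) (d : Char) :
    (List.replicate s 'X' ++ l).getD t d = if t < s then 'X' else l.getD (t - s) d := by
  by_cases h : t < s
  · rw [List.getD_append _ _ _ _ (by simpa using h), if_pos h, List.getD_replicate _ h]
  · rw [List.getD_append_right _ _ _ _ (by simpa using Nat.le_of_not_lt h), if_neg h]
    simp

lemma set_repl_append (s : Nat) (l : List Char) (t : Nat) (v : Char) (h : s ≤ t) :
    (List.replicate s 'X' ++ l).set t v = List.replicate s 'X' ++ l.set (t - s) v := by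
  rw [List.set_append, if_neg (by simp; omega)]
  simp

lemma leadX_le_length (r : List Char) : leadX r ≤ r.length := by
  induction r with
  | nil => simp [leadX]
  | cons a r ih => by_cases h : a = 'X' <;> simp [leadX, h] <;> omega

lemma leadX_lt_X (r : List Char) : ∀ u < leadX r, r.getD u 'X' = 'X' := by
  induction r with
  | nil => simp [leadX]
  | cons a r ih =>
    intro u hu
    by_cases h : a = 'X'
    · cases u with
      | zero => simpa using h
      | succ u =>
        simp only [leadX, if_pos h] at hu
        simpa using ih u (by omega)
    · simp [leadX, h] at hu

lemma leadX_stop (r : List Char) : leadX r = r.length ∨ r.getD (leadX r) 'X' ≠ 'X' := by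
  induction r with
  | nil => left; simp [leadX]
  | cons a r ih =>
    by_cases h : a = 'X'
    · rcases ih with h2 | h2
      · left; simp [leadX, h, h2]
      · right; simpa [leadX, h] using h2
    · right; simpa [leadX, h] using h

lemma collectUp_nofire (c : List Char) (t : Nat) (h : c.getD t 'X' = 'X') :
    collectUp c t = ([], c) := by
  cases t with
  | zero => rw [collectUp, if_neg (by simp only [ne_eq, not_not]; exact h)]
  | succ t => rw [collectUp, if_neg (by simp only [ne_eq, not_not]; exact h)]

lemma collectUp_spec (run : List Char) :
    ∀ (s : Nat) (rest : List Char), run ≠ [] → (∀ a ∈ run, a ≠ 'X') →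
    collectUp (List.replicate s 'X' ++ (run ++ rest)) (s + run.length - 1) =
      (run.reverse, List.replicate (s + run.length) 'X' ++ rest) := by
  induction run using List.reverseRecOn with
  | nil => intro s rest h; exact absurd rfl h
  | append_singleton ts b ih =>
    intro s rest _ hX
    have hb : b ≠ 'X' := hX b (by simp)
    have hget : (List.replicate s 'X' ++ ((ts ++ [b]) ++ rest)).getD (s + ts.length) 'X' = b := by
      rw [getD_repl_append, if_neg (by omega)]
      rw [List.append_assoc]
      rw [List.getD_append_right _ _ _ _ (by simp)]
      simp
    have hset : (List.replicate s 'X' ++ ((ts ++ [b]) ++ rest)).set (s + ts.length) 'X' =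
        List.replicate s 'X' ++ (ts ++ ('X' :: rest)) := by
      rw [set_repl_append _ _ _ _ (by omega), List.append_assoc, List.set_append]
      rw [if_neg (by simp)]
      simp
    cases ts with
    | nil =>
      simp only [List.nil_append, List.length_nil, Nat.add_zero] at hget hset ⊢
      have hidx : s + ([b] : List Char).length - 1 = s := by simp
      rw [hidx]
      cases s with
      | zero =>
        rw [collectUp, if_pos (by simp [hget, hb])]
        rw [hget, hset]
        simp [List.replicate_succ']
      | succ s' =>
        rw [collectUp, if_pos (by simp [hget, hb])]
        rw [hget, hset]
        rw [collectUp_nofire _ s' (by rw [getD_repl_append, if_pos (by omega)])]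
        simp [List.replicate_succ', List.append_assoc]
    | cons t0 ts0 =>
      have hidx : s + ((t0 :: ts0 ++ [b] : List Char)).length - 1 = (s + ts0.length) + 1 := by
        simp; omega
      rw [hidx]
      have hidx2 : (s + ts0.length) + 1 = s + (t0 :: ts0 : List Char).length := by simp; omega
      rw [collectUp, if_pos (by rw [hidx2, hget]; simp [hb])]
      rw [hidx2, hget, hset]
      have ihx := ih s ('X' :: rest) (by simp) (fun a ha => hX a (List.mem_append_left _ ha))
      have hidx3 : s + (t0 :: ts0 : List Char).length - 1 = (s + ts0.length) := by simp
      rw [hidx3] at ihx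
      have hidx4 : (s + ts0.length) = s + (t0 :: ts0 : List Char).length - 1 := by simp
      rw [ihx]
      refine Prod.ext (by simp) ?_
      show List.replicate (s + (t0 :: ts0).length) 'X' ++ 'X' :: rest =
        List.replicate (s + (t0 :: ts0 ++ [b]).length) 'X' ++ rest
      rw [show s + (t0 :: ts0 ++ [b]).length = (s + (t0 :: ts0).length) + 1 by simp; try omega,
        List.replicate_succ', List.append_assoc]
      rfl

lemma popFill_nil (c : List Char) (a : Nat) : popFill c a a [] = c := by
  rw [popFill]; simp

lemma popFill_spec (temp : List Char) : ∀ (c : List Char) (a : Nat),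
    a + temp.length ≤ c.length →
    popFill c a (a + temp.length) temp = c.take a ++ temp.reverse ++ c.drop (a + temp.length) := by
  induction temp using List.reverseRecOn with
  | nil =>
    intro c a h
    simp only [List.length_nil, Nat.add_zero]
    rw [popFill_nil]
    simp [List.take_append_drop]
  | append_singleton ts b ih =>
    intro c a h
    rw [popFill, if_pos (by simp; try omega)]
    rw [List.getLastD_concat, List.dropLast_concat]
    have h2 : a + (ts ++ [b]).length = (a + 1) + ts.length := by simp; omega
    rw [h2]
    have hlen : a < c.length := by simp at h; omega
    rw [ih (c.set a b) (a + 1) (by rw [List.length_set]; simp at h; omega)]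
    have htake : (c.set a b).take (a + 1) = c.take a ++ [b] := by
      rw [List.take_set, List.take_add_one, List.getElem?_eq_getElem hlen]
      rw [List.set_append, if_neg (by simp [hlen]; try omega)]
      simp [List.length_take, Nat.min_eq_left (Nat.le_of_lt hlen)]
    have hdrop : (c.set a b).drop ((a + 1) + ts.length) = c.drop ((a + 1) + ts.length) :=
      List.drop_set_of_lt (by omega)
    rw [htake, hdrop]
    simp [List.append_assoc]

lemma kScan_spec (M : Nat) (temp : List Char) : ∀ (e k : Nat) (c : List Char),
    c.length = M → k + e ≤ M → temp.length ≤ k →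
    (∀ u < e, c.getD (k + u) 'X' = 'X') →
    (k + e = M ∨ c.getD (k + e) 'X' ≠ 'X') →
    kScan M c k temp =
      c.take (k + e - temp.length) ++ temp.reverse ++ c.drop (k + e) := by
  intro e
  induction e with
  | zero =>
    intro k c hlen hkM htl _ hstop
    simp only [Nat.add_zero] at hkM hstop ⊢
    rcases hstop with hstop | hstop
    · -- k = M : loop range empty, trailing fill
      subst hstop
      rw [kScan, if_neg (by omega)]
      by_cases ht : temp = []
      · subst ht
        rw [if_neg (by simp)]
        simp only [List.length_nil, Nat.sub_zero, List.reverse_nil, List.append_nil]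
        rw [← hlen, List.take_length, List.drop_length, List.append_nil]
      · rw [if_pos ht]
        have ha : k - temp.length + temp.length = k := by omega
        have hspec := popFill_spec temp c (k - temp.length) (by omega)
        rw [ha] at hspec
        exact hspec
    · have hkM' : k < M := by
        rcases Nat.lt_or_ge k M with h | h
        · exact h
        · exfalso
          have : k = M := by omega
          subst this
          exact hstop (by rw [List.getD_eq_getElem?_getD, List.getElem?_eq_none (by omega)]; rfl)
      rw [kScan, if_pos hkM', if_pos hstop]
      have ha : k - temp.length + temp.length = k := by omega
      have hspec := popFill_spec temp c (k - temp.length) (by omega)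
      rw [ha] at hspec
      exact hspec
  | succ e ihe =>
    intro k c hlen hkM htl hX hstop
    have hk : k < M := by omega
    have hcX : c.getD k 'X' = 'X' := by simpa using hX 0 (by omega)
    rw [kScan, if_pos hk, if_neg (by simp only [ne_eq, not_not]; exact hcX)]
    have hset : c.set k 'X' = c := by
      conv_lhs => rw [← hcX]
      rw [List.getD_eq_getElem c 'X' (by omega)]
      exact List.set_getElem_self (by omega)
    rw [hset]
    have := ihe (k + 1) c hlen (by omega) (by omega)
      (fun u hu => by have := hX (u + 1) (by omega); rwa [show k + 1 + u = k + (u + 1) by omega])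
      (by rcases hstop with h | h
          · left; omega
          · right; rwa [show k + 1 + e = k + (e + 1) by omega])
    rw [this]
    have : k + 1 + e = k + (e + 1) := by omega
    rw [this]

lemma take_leadX (l : List Char) : ∀ t ≤ leadX l, l.take t = List.replicate t 'X' := by
  induction l with
  | nil => intro t ht; simp [leadX] at ht; simp [ht]
  | cons a r ih =>
    intro t ht
    by_cases ha : a = 'X'
    · cases t with
      | zero => simp
      | succ u =>
        simp only [leadX, if_pos ha] at ht
        rw [List.take_succ_cons, ih u (by omega), ha, ← List.replicate_succ]
    · simp [leadX, ha] at ht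
      simp [ht]

lemma all_take_eq_replicate (c : List Char) (k : Nat) (hk : k ≤ c.length)
    (h : ∀ u < k, c.getD u 'X' = 'X') : c.take k = List.replicate k 'X' := by
  apply List.ext_getElem (by simp; omega)
  intro u h1 h2
  rw [List.getElem_take, List.getElem_replicate]
  have := h u (by simp at h1; omega)
  rwa [List.getD_eq_getElem c 'X' (by simp at h1; omega)] at this

lemma leadX_pos (l : List Char) (hne : l ≠ []) (h : l.getD 0 'X' = 'X') : 1 ≤ leadX l := by
  cases l with
  | nil => exact absurd rfl hne
  | cons a r => simp only [List.getD_cons_zero] at h; simp [leadX, h]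

lemma colBody_fired (M i s : Nat) (run rest : List Char) (c : List Char)
    (hc : c = List.replicate s 'X' ++ (run ++ rest))
    (hM : s + run.length = i + 1) (hiM : i + 1 < M) (hlen : c.length = M)
    (hrun : ∀ a ∈ run, a ≠ 'X') (hne : run ≠ [])
    (hX1 : c.getD (i + 1) 'X' = 'X') :
    colBody M i c =
      List.replicate (s + leadX rest) 'X' ++ (run ++ rest.drop (leadX rest)) := by
  have hr1 : 0 < run.length := List.length_pos_iff.mpr hne
  have hrl : s + (run.length + rest.length) = M := by
    rw [hc] at hlen; simp at hlen; omega
  have hgi : c.getD i 'X' ≠ 'X' := by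
    rw [hc, getD_repl_append, if_neg (by omega)]
    rw [List.getD_append _ _ _ _ (by omega)]
    rw [List.getD_eq_getElem _ _ (by omega)]
    exact hrun _ (List.getElem_mem _)
  rw [colBody, if_pos ⟨hX1, hgi⟩]
  have hidx : i = s + run.length - 1 := by omega
  rw [hidx, hc, collectUp_spec run s rest hne hrun]
  -- the redundant board[i][j] = 'X' write
  have hset : ((List.replicate (s + run.length) 'X' ++ rest).set (s + run.length - 1) 'X')
      = List.replicate (s + run.length) 'X' ++ rest := by
    rw [List.set_append, if_pos (by simp; omega)]
    rw [List.set_replicate_self]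
  simp only [hset]
  rw [show s + run.length - 1 + 1 = i + 1 by omega, hM]
  have herest : leadX rest ≤ rest.length := leadX_le_length rest
  have hres := kScan_spec M run.reverse (leadX rest) (i + 1)
    (List.replicate (i + 1) 'X' ++ rest)
    (by simp; omega) (by omega) (by simp; omega)
    (by intro u hu
        rw [getD_repl_append, if_neg (by omega)]
        rw [show i + 1 + u - (i + 1) = u by omega]
        exact leadX_lt_X rest u hu)
    (by rcases leadX_stop rest with h | h
        · left; omega
        · right
          rw [getD_repl_append, if_neg (by omega),
            show i + 1 + leadX rest - (i + 1) = leadX rest by omega]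
          exact h)
  rw [hres, List.reverse_reverse]
  have htake : (List.replicate (i + 1) 'X' ++ rest).take (i + 1 + leadX rest - run.reverse.length)
      = List.replicate (s + leadX rest) 'X' := by
    rw [List.length_reverse]
    rw [show i + 1 + leadX rest - run.length = s + leadX rest by omega]
    apply all_take_eq_replicate _ _ (by simp; omega)
    intro u hu
    rw [getD_repl_append]
    by_cases h2 : u < i + 1
    · rw [if_pos h2]
    · rw [if_neg h2]
      exact leadX_lt_X rest _ (by omega)
  have hdrop : (List.replicate (i + 1) 'X' ++ rest).drop (i + 1 + leadX rest)
      = rest.drop (leadX rest) := by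
    rw [List.drop_append, List.drop_replicate]
    rw [show i + 1 + leadX rest - (List.replicate (i + 1) 'X').length = leadX rest by simp]
    simp [show i + 1 - (i + 1 + leadX rest) = 0 by omega]
  rw [htake, hdrop, List.append_assoc]

lemma sortedUp_mono {i j : Nat} (c : List Char) (h : j ≤ i) (hs : SortedUp i c) :
    SortedUp j c := fun t ht => hs t (by omega)

lemma sortedUp_chain {i : Nat} {c : List Char} (h : SortedUp i c) :
    ∀ t u, t ≤ u → u ≤ i → u < c.length → c.getD t 'X' ≠ 'X' → c.getD u 'X' ≠ 'X' := by
  intro t u htu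
  induction u, htu using Nat.le_induction with
  | base => intro _ _ ht; exact ht
  | succ u hu ih =>
    intro hui hul ht
    exact h u (by omega) (by omega) (ih (by omega) (by omega) ht)

lemma sorted_decomp (c : List Char) (i : Nat) (hi : i < c.length) (hs : SortedUp i c)
    (hnx : c.getD i 'X' ≠ 'X') :
    ∃ s run, c = List.replicate s 'X' ++ (run ++ c.drop (i + 1)) ∧
      s + run.length = i + 1 ∧ (∀ a ∈ run, a ≠ 'X') ∧ run ≠ [] := by
  induction i with
  | zero =>
    refine ⟨0, [c.getD 0 'X'], ?_, by simp, by simpa using hnx, by simp⟩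
    rw [List.getD_eq_getElem _ _ hi]
    simpa using List.drop_eq_getElem_cons hi
  | succ i ih =>
    by_cases hci : c.getD i 'X' = 'X'
    · -- everything up to i is 'X'
      have hall : ∀ u < i + 1, c.getD u 'X' = 'X' := by
        intro u hu
        by_contra hne
        rcases Nat.lt_or_ge u i with h2 | h2
        · exact (sortedUp_chain (sortedUp_mono c (Nat.le_succ i) hs) u i (by omega)
            (le_refl i) (by omega) hne) hci
        · have : u = i := by omega
          subst this; exact hne hci
      refine ⟨i + 1, [c.getD (i + 1) 'X'], ?_, by simp, by simpa using hnx, by simp⟩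
      conv_lhs => rw [← List.take_append_drop (i + 1) c]
      rw [all_take_eq_replicate c (i + 1) (by omega) hall]
      congr 1
      rw [List.getD_eq_getElem _ _ hi]
      simpa using List.drop_eq_getElem_cons hi
    · obtain ⟨s, run, hc, hlen, hr, hne⟩ := ih (by omega) (sortedUp_mono c (Nat.le_succ i) hs) hci
      refine ⟨s, run ++ [c.getD (i + 1) 'X'], ?_, by simp; omega,
        ?_, by simp⟩
      · conv_lhs => rw [hc]
        congr 1
        rw [List.append_assoc]
        congr 1
        rw [List.getD_eq_getElem _ _ hi]
        simpa using List.drop_eq_getElem_cons hi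
      · intro a ha
        rcases List.mem_append.mp ha with h2 | h2
        · exact hr a h2
        · simpa using (List.mem_singleton.mp h2) ▸ hnx

lemma gravCol_eq (M : Nat) (c : List Char) :
    gravCol M c = List.replicate (M - (fX c).length) 'X' ++ fX c := rfl

lemma getD_drop_zero (c : List Char) (k : Nat) (hk : k < c.length) :
    (c.drop k).getD 0 'X' = c.getD k 'X' := by
  rw [List.drop_eq_getElem_cons hk, List.getD_cons_zero, List.getD_eq_getElem _ _ hk]

lemma colBody_step (M i : Nat) (c : List Char) (hlen : c.length = M) (hiM : i + 1 < M)
    (hs : SortedUp i c) :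
    (colBody M i c).length = M ∧ SortedUp (i + 1) (colBody M i c) ∧
      fX (colBody M i c) = fX c := by
  by_cases hf : c.getD (i + 1) 'X' = 'X' ∧ c.getD i 'X' ≠ 'X'
  · obtain ⟨s, run, hc, hM, hrun, hne⟩ := sorted_decomp c i (by omega) hs hf.2
    have hfired := colBody_fired M i s run (c.drop (i + 1)) c hc hM hiM hlen hrun hne hf.1
    have hr1 : 0 < run.length := List.length_pos_iff.mpr hne
    have hrest : (c.drop (i + 1)).length = M - (i + 1) := by simp [hlen]
    have hrne : c.drop (i + 1) ≠ [] := by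
      intro h0; rw [h0] at hrest; simp at hrest; omega
    have he1 : 1 ≤ leadX (c.drop (i + 1)) :=
      leadX_pos _ hrne (by rw [getD_drop_zero c (i + 1) (by omega)]; exact hf.1)
    have he2 : leadX (c.drop (i + 1)) ≤ (c.drop (i + 1)).length := leadX_le_length _
    refine ⟨?_, ?_, ?_⟩
    · rw [hfired]; simp; omega
    · rw [hfired]
      intro t ht htl hnz
      rw [getD_repl_append] at hnz ⊢
      by_cases h2 : t < s + leadX (c.drop (i + 1))
      · exact absurd rfl (by rw [if_pos h2] at hnz; exact hnz)
      · rw [if_neg (by omega)]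
        have hidx : t + 1 - (s + leadX (c.drop (i + 1))) < run.length := by omega
        rw [List.getD_append _ _ _ _ hidx, List.getD_eq_getElem _ _ hidx]
        exact hrun _ (List.getElem_mem _)
    · rw [hfired]
      conv_rhs => rw [hc]
      have htk : (c.drop (i + 1)).take (leadX (c.drop (i + 1))) =
          List.replicate (leadX (c.drop (i + 1))) 'X' := take_leadX _ _ (le_refl _)
      conv_rhs => rw [show c.drop (i + 1) =
        (c.drop (i + 1)).take (leadX (c.drop (i + 1))) ++
          (c.drop (i + 1)).drop (leadX (c.drop (i + 1))) from
            (List.take_append_drop _ _).symm]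
      rw [htk]
      simp [fX, List.filter_append, List.filter_replicate]
  · rw [colBody, if_neg hf]
    refine ⟨hlen, ?_, rfl⟩
    intro t ht htl hnz
    rcases Nat.lt_or_ge t i with h2 | h2
    · exact hs t h2 htl hnz
    · have : t = i := by omega
      subst this
      by_cases h3 : c.getD (t + 1) 'X' = 'X'
      · exact absurd ⟨h3, hnz⟩ hf
      · exact h3

def colPass (M k : Nat) (c : List Char) : List Char :=
  (List.range k).foldl (fun c i => colBody M i c) c

lemma colPass_succ (M k : Nat) (c : List Char) :
    colPass M (k + 1) c = colBody M k (colPass M k c) := by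
  unfold colPass; rw [List.range_succ, List.foldl_append]; simp

lemma colPass_inv (M : Nat) (c : List Char) (hlen : c.length = M) :
    ∀ k, k ≤ M - 1 → (colPass M k c).length = M ∧ SortedUp k (colPass M k c) ∧
      fX (colPass M k c) = fX c := by
  intro k
  induction k with
  | zero =>
    intro _
    exact ⟨by simpa [colPass], fun t ht => absurd ht (Nat.not_lt_zero t), rfl⟩
  | succ k ihk =>
    intro hk1
    obtain ⟨h1, h2, h3⟩ := ihk (by omega)
    obtain ⟨g1, g2, g3⟩ := colBody_step M k (colPass M k c) h1 (by omega) h2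
    exact ⟨by rw [colPass_succ]; exact g1, by rw [colPass_succ]; exact g2,
      by rw [colPass_succ, g3, h3]⟩

lemma sorted_eq_grav (c : List Char) : ∀ (M : Nat), c.length = M →
    (∀ t, t + 1 < M → c.getD t 'X' ≠ 'X' → c.getD (t + 1) 'X' ≠ 'X') → gravCol M c = c := by
  induction c with
  | nil => intro M h _; subst h; simp [gravCol]
  | cons a r ih =>
    intro M h hsort
    subst h
    by_cases ha : a = 'X'
    · subst ha
      have ihr := ih r.length rfl (fun t ht h1 => by
        have := hsort (t + 1) (by simp; omega) (by simpa using h1)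
        simpa using this)
      rw [gravCol_eq] at ihr ⊢
      have hfx : fX ('X' :: r) = fX r := by simp [fX]
      rw [hfx]
      have hlen2 : (fX r).length ≤ r.length := List.length_filter_le _ _
      rw [show ('X' :: r).length - (fX r).length = (r.length - (fX r).length) + 1 by
        simp; omega]
      rw [List.replicate_succ, List.cons_append, ihr]
    · have hall : ∀ u, u < (a :: r).length → (a :: r).getD u 'X' ≠ 'X' := by
        intro u
        induction u with
        | zero => intro _; simpa using ha
        | succ u ihu =>
          intro hu
          exact hsort u (by simpa using hu) (ihu (by simp at hu ⊢; omega))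
      have hfx : fX (a :: r) = a :: r := by
        rw [fX, List.filter_eq_self]
        intro b hb
        rcases List.mem_iff_getElem.mp hb with ⟨u, hu, hbu⟩
        have h2 := hall u (by simpa using hu)
        rw [List.getD_eq_getElem _ _ (by simpa using hu)] at h2
        simp [hbu ▸ h2]
      rw [gravCol_eq, hfx]
      simp

lemma colPass_eq_grav (M : Nat) (c : List Char) (hlen : c.length = M) :
    colPass M (M - 1) c = gravCol M c := by
  obtain ⟨h1, h2, h3⟩ := colPass_inv M c hlen (M - 1) (le_refl _)
  have hg := sorted_eq_grav (colPass M (M - 1) c) M h1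
    (fun t ht => h2 t (by omega) (by rw [h1]; omega))
  calc colPass M (M - 1) c = gravCol M (colPass M (M - 1) c) := hg.symm
    _ = gravCol M c := by rw [gravCol_eq, gravCol_eq, h3]

-- ---------- grid-level machinery ----------

def ShapeG (M N : Nat) (g : List (List Char)) : Prop :=
  M ≤ g.length ∧ ∀ i < M, N ≤ (g.getD i []).length

lemma length_setColM (g : List (List Char)) : ∀ (M j : Nat) (col : List Char),
    (setColM g M j col).length = g.length := by
  induction g with
  | nil => intro M j col; cases M <;> cases col <;> rfl
  | cons r g ih =>
    intro M j col
    cases M with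
    | zero => rfl
    | succ M => cases col with
      | nil => rfl
      | cons v col => simpa [setColM] using ih M j col

lemma row_setColM (g : List (List Char)) : ∀ (M j : Nat) (col : List Char) (t : Nat),
    ((setColM g M j col).getD t []).length = (g.getD t []).length := by
  induction g with
  | nil => intro M j col t; cases M <;> cases col <;> rfl
  | cons r g ih =>
    intro M j col t
    cases M with
    | zero => rfl
    | succ M => cases col with
      | nil => rfl
      | cons v col =>
        cases t with
        | zero => simp [setColM]
        | succ t => simpa [setColM] using ih M j col t

lemma length_getColM (g : List (List Char)) : ∀ (M j : Nat), M ≤ g.length →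
    (getColM g M j).length = M := by
  induction g with
  | nil => intro M j h; simp at h; subst h; rfl
  | cons r g ih =>
    intro M j h
    cases M with
    | zero => rfl
    | succ M => simpa [getColM] using ih M j (by simpa using h)

lemma getColM_setColM_self (g : List (List Char)) : ∀ (M j : Nat) (col : List Char),
    M ≤ g.length → col.length = M → (∀ i < M, j < (g.getD i []).length) →
    getColM (setColM g M j col) M j = col := by
  induction g with
  | nil =>
    intro M j col h hc _
    simp at h; subst h
    rw [List.length_eq_zero_iff] at hc; subst hc; rfl
  | cons r g ih =>
    intro M j col h hc hrow
    cases M with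
    | zero => simp at hc; simp [hc, getColM]
    | succ M => cases col with
      | nil => simp at hc
      | cons v col =>
        simp only [setColM, getColM]
        refine List.cons_eq_cons.mpr ⟨?_, ?_⟩
        · exact gD_set_self r j v 'X' (by simpa using hrow 0 (by omega))
        · exact ih M j col (by simpa using h) (by simpa using hc)
            (fun i hi => by simpa using hrow (i + 1) (by omega))

lemma getColM_setColM_ne (g : List (List Char)) : ∀ (M j j' : Nat) (col : List Char),
    j' ≠ j → getColM (setColM g M j col) M j' = getColM g M j' := by
  induction g with
  | nil => intro M j j' col h; cases M <;> cases col <;> rfl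
  | cons r g ih =>
    intro M j j' col h
    cases M with
    | zero => rfl
    | succ M => cases col with
      | nil => rfl
      | cons v col =>
        simp only [setColM, getColM]
        exact List.cons_eq_cons.mpr ⟨gD_set_ne r v 'X' (Ne.symm h), ih M j j' col h⟩

lemma setColM_comm (g : List (List Char)) : ∀ (M j j' : Nat) (col col' : List Char),
    j ≠ j' → setColM (setColM g M j col) M j' col' = setColM (setColM g M j' col') M j col := by
  induction g with
  | nil => intro M j j' col col' h; cases M <;> cases col <;> cases col' <;> rfl
  | cons r g ih =>
    intro M j j' col col' h
    cases M with
    | zero => rfl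
    | succ M =>
      cases col with
      | nil => cases col' <;> rfl
      | cons v col =>
        cases col' with
        | nil => rfl
        | cons w col' =>
          simp only [setColM]
          exact List.cons_eq_cons.mpr ⟨List.set_comm _ _ h, ih M j j' col col' h⟩

lemma setColM_setColM (g : List (List Char)) : ∀ (M j : Nat) (col col' : List Char),
    col.length = col'.length →
    setColM (setColM g M j col) M j col' = setColM g M j col' := by
  induction g with
  | nil => intro M j col col' h; cases M <;> cases col <;> cases col' <;> rfl
  | cons r g ih =>
    intro M j col col' h
    cases M with
    | zero => rfl
    | succ M =>
      cases col with
      | nil => cases col' with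
        | nil => rfl
        | cons w col' => simp at h
      | cons v col =>
        cases col' with
        | nil => simp at h
        | cons w col' =>
          simp only [setColM, List.set_set]
          exact List.cons_eq_cons.mpr ⟨rfl, ih M j col col' (by simpa using h)⟩

lemma setColM_getColM_self (g : List (List Char)) : ∀ (M j : Nat),
    M ≤ g.length → (∀ i < M, j < (g.getD i []).length) →
    setColM g M j (getColM g M j) = g := by
  induction g with
  | nil => intro M j h _; simp at h; subst h; rfl
  | cons r g ih =>
    intro M j h hrow
    cases M with
    | zero => rfl
    | succ M =>
      simp only [getColM, setColM]
      refine List.cons_eq_cons.mpr ⟨?_, ?_⟩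
      · have hj : j < r.length := by simpa using hrow 0 (by omega)
        rw [List.getD_eq_getElem _ _ hj]
        exact List.set_getElem_self hj
      · exact ih M j (by simpa using h) (fun i hi => by simpa using hrow (i + 1) (by omega))

def applyCols (M k : Nat) (h : Nat → List Char → List Char) (g : List (List Char)) :
    List (List Char) :=
  (List.range k).foldl (fun g j => setColM g M j (h j (getColM g M j))) g

lemma applyCols_succ (M k : Nat) (h : Nat → List Char → List Char) (g : List (List Char)) :
    applyCols M (k + 1) h g =
      setColM (applyCols M k h g) M k (h k (getColM (applyCols M k h g) M k)) := by
  unfold applyCols; rw [List.range_succ, List.foldl_append]; simp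

lemma length_applyCols (M k : Nat) (h : Nat → List Char → List Char) (g : List (List Char)) :
    (applyCols M k h g).length = g.length := by
  induction k with
  | zero => rfl
  | succ k ih => rw [applyCols_succ, length_setColM, ih]

lemma row_applyCols (M k : Nat) (h : Nat → List Char → List Char) (g : List (List Char))
    (t : Nat) : ((applyCols M k h g).getD t []).length = (g.getD t []).length := by
  induction k with
  | zero => rfl
  | succ k ih => rw [applyCols_succ, row_setColM, ih]

lemma applyCols_untouched (M k : Nat) (h : Nat → List Char → List Char) (g : List (List Char))
    (j : Nat) (hj : k ≤ j) : getColM (applyCols M k h g) M j = getColM g M j := by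
  induction k with
  | zero => rfl
  | succ k ih =>
    rw [applyCols_succ, getColM_setColM_ne _ _ _ _ _ (by omega), ih (by omega)]

lemma applyCols_comm_setColM (M k : Nat) (h : Nat → List Char → List Char)
    (g : List (List Char)) (j : Nat) (col : List Char) (hj : k ≤ j) :
    applyCols M k h (setColM g M j col) = setColM (applyCols M k h g) M j col := by
  induction k with
  | zero => rfl
  | succ k ih =>
    rw [applyCols_succ, ih (by omega), getColM_setColM_ne _ _ _ _ _ (by omega),
      setColM_comm _ _ _ _ _ _ (by omega), applyCols_succ]

lemma applyCols_id (M k N : Nat) (g : List (List Char)) (hS : ShapeG M N g) (hk : k ≤ N) :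
    applyCols M k (fun _ c => c) g = g := by
  induction k with
  | zero => rfl
  | succ k ih =>
    rw [applyCols_succ, ih (by omega)]
    exact setColM_getColM_self g M k hS.1 (fun i hi => by
      have := hS.2 i hi; omega)

lemma applyCols_compose (M N : Nat) (h1 h2 : Nat → List Char → List Char)
    (g : List (List Char)) (hS : ShapeG M N g)
    (hlen1 : ∀ j c, c.length = M → (h1 j c).length = M)
    (hlen2 : ∀ j c, c.length = M → (h2 j c).length = M) :
    ∀ k, k ≤ N →
    applyCols M k h2 (applyCols M k h1 g) = applyCols M k (fun j c => h2 j (h1 j c)) g := by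
  intro k
  induction k with
  | zero => intro _; rfl
  | succ k ih =>
    intro hk1
    have hcolk : (getColM g M k).length = M := length_getColM g M k hS.1
    have hrows1 : ∀ i < M, k < ((applyCols M k h2 (applyCols M k h1 g)).getD i []).length := by
      intro i hi
      rw [row_applyCols, row_applyCols]
      have := hS.2 i hi; omega
    have hA1 : applyCols M (k + 1) h1 g =
        setColM (applyCols M k h1 g) M k (h1 k (getColM g M k)) := by
      rw [applyCols_succ, applyCols_untouched M k h1 g k (le_refl k)]
    rw [hA1, applyCols_succ, applyCols_comm_setColM M k h2 _ k _ (le_refl k)]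
    rw [getColM_setColM_self _ M k _
      (by rw [length_applyCols, length_applyCols]; exact hS.1)
      (hlen1 k _ hcolk) (fun i hi => by
        rw [row_applyCols, row_applyCols]; have := hS.2 i hi; omega)]
    rw [setColM_setColM _ M k _ _
      (by rw [hlen1 k _ hcolk, hlen2 k _ (hlen1 k _ hcolk)])]
    rw [ih (by omega)]
    rw [applyCols_succ, applyCols_untouched M k _ g k (le_refl k)]

lemma applyCols_congr (M N : Nat) (h1 h2 : Nat → List Char → List Char)
    (g : List (List Char))
    (h : ∀ j < N, h1 j (getColM g M j) = h2 j (getColM g M j)) :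
    ∀ k, k ≤ N → applyCols M k h1 g = applyCols M k h2 g := by
  intro k
  induction k with
  | zero => intro _; rfl
  | succ k ih =>
    intro hk1
    rw [applyCols_succ, applyCols_succ, ih (by omega),
      applyCols_untouched M k h2 g k (le_refl k), h k (by omega)]

-- ---------- lengths of A's blockDown pieces ----------

lemma length_collectUp : ∀ (t : Nat) (c : List Char), (collectUp c t).2.length = c.length := by
  intro t
  induction t with
  | zero => intro c; rw [collectUp]; split <;> simp
  | succ t ih =>
    intro c
    rw [collectUp]
    split
    · simpa using ih (c.set (t + 1) 'X')
    · rfl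

lemma length_popFill (c : List Char) (t k : Nat) (temp : List Char) :
    (popFill c t k temp).length = c.length := by
  have key : ∀ (fuel : Nat) (c : List Char) (t k : Nat) (temp : List Char), k - t ≤ fuel →
      (popFill c t k temp).length = c.length := by
    intro fuel
    induction fuel with
    | zero => intro c t k temp h; rw [popFill, if_neg (by omega)]
    | succ fu ih =>
      intro c t k temp h
      rw [popFill]
      split
      · rw [ih _ _ _ _ (by omega)]; simp
      · rfl
  exact key (k - t) c t k temp (le_refl _)

lemma length_kScan (M : Nat) (c : List Char) (k : Nat) (temp : List Char) :
    (kScan M c k temp).length = c.length := by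
  have key : ∀ (fuel : Nat) (c : List Char) (k : Nat) (temp : List Char), M - k ≤ fuel →
      (kScan M c k temp).length = c.length := by
    intro fuel
    induction fuel with
    | zero =>
      intro c k temp h
      rw [kScan, if_neg (by omega)]
      split
      · rw [length_popFill]
      · rfl
    | succ fu ih =>
      intro c k temp h
      rw [kScan]
      split
      · split
        · rw [length_popFill]
        · rw [ih _ _ _ (by omega)]; simp
      · split
        · rw [length_popFill]
        · rfl
  exact key (M - k) c k temp (le_refl _)

lemma length_colBody (M i : Nat) (c : List Char) : (colBody M i c).length = c.length := by
  rw [colBody]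
  split
  · rw [length_kScan, List.length_set, length_collectUp]
  · rfl

lemma length_colPass (M k : Nat) (c : List Char) : (colPass M k c).length = c.length := by
  induction k with
  | zero => rfl
  | succ k ih => rw [colPass_succ, length_colBody, ih]

-- ---------- blockDown = per-column gravity ----------

lemma blockDownA_eq_fold (m n : Int) (g : List (List Char)) :
    blockDownA m n g = (List.range (m - 1).toNat).foldl
      (fun g i => applyCols m.toNat n.toNat (fun _ c => colBody m.toNat i c) g) g := rfl

lemma gravityB_eq (m n : Int) (g : List (List Char)) :
    gravityB m n g = applyCols m.toNat n.toNat (fun _ c => gravCol m.toNat c) g := rfl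

lemma blockDown_eq_gravity (m n : Int) (g : List (List Char))
    (hS : ShapeG m.toNat n.toNat g) : blockDownA m n g = gravityB m n g := by
  have key : ∀ K, (List.range K).foldl
      (fun g i => applyCols m.toNat n.toNat (fun _ c => colBody m.toNat i c) g) g =
      applyCols m.toNat n.toNat (fun _ c => colPass m.toNat K c) g := by
    intro K
    induction K with
    | zero => exact (applyCols_id m.toNat n.toNat n.toNat g hS (le_refl _)).symm
    | succ K ih =>
      rw [List.range_succ, List.foldl_append, List.foldl_cons, List.foldl_nil, ih]
      rw [applyCols_compose m.toNat n.toNat (fun _ c => colPass m.toNat K c)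
        (fun _ c => colBody m.toNat K c) g hS
        (fun j c h => by rw [length_colPass, h])
        (fun j c h => by rw [length_colBody, h]) n.toNat (le_refl _)]
      congr 1
      funext j c
      rw [colPass_succ]
  rw [blockDownA_eq_fold, key, gravityB_eq]
  apply applyCols_congr m.toNat n.toNat _ _ g _ n.toNat (le_refl _)
  intro j hj
  rw [show (m - 1).toNat = m.toNat - 1 by omega]
  exact colPass_eq_grav m.toNat _ (length_getColM g m.toNat j hS.1)

-- ---------- shape preservation ----------

lemma length_gset (g : List (List Char)) (i j : Nat) (c : Char) :
    (gset g i j c).length = g.length := List.length_set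

lemma row_gset (g : List (List Char)) (i j : Nat) (c : Char) (t : Nat) :
    ((gset g i j c).getD t []).length = (g.getD t []).length := by
  unfold gset
  by_cases hti : t = i
  · subst hti
    by_cases hlt : t < g.length
    · rw [List.getD_eq_getElem?_getD, List.getElem?_set_self hlt]
      simp [List.getD_eq_getElem?_getD]
    · rw [List.set_eq_of_length_le (by omega)]
  · rw [List.getD_eq_getElem?_getD, List.getElem?_set_ne (fun h => hti h.symm),
      ← List.getD_eq_getElem?_getD]

lemma shape_gset (M N : Nat) (g : List (List Char)) (i j : Nat) (c : Char)
    (hS : ShapeG M N g) : ShapeG M N (gset g i j c) := by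
  refine ⟨by rw [length_gset]; exact hS.1, fun t ht => ?_⟩
  rw [row_gset]; exact hS.2 t ht

lemma shape_delect (M N : Nat) (d : PySem.Set (Nat × Nat)) :
    ∀ (g : List (List Char)), ShapeG M N g → ShapeG M N (delectA d g) := by
  unfold delectA
  induction d with
  | nil => intro g hS; exact hS
  | cons p d ih => intro g hS; exact ih _ (shape_gset M N g p.1 p.2 'X' hS)

lemma shape_gravity (m n : Int) (g : List (List Char))
    (hS : ShapeG m.toNat n.toNat g) : ShapeG m.toNat n.toNat (gravityB m n g) := by
  refine ⟨?_, fun t ht => ?_⟩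
  · rw [gravityB_eq, length_applyCols]; exact hS.1
  · rw [gravityB_eq, row_applyCols]; exact hS.2 t ht

-- ---------- the two scans build the same set ----------

lemma find_eq (m n : Int) (g : List (List Char)) : find4A m n g = findB m n g := by
  unfold find4A findB
  congr 1
  funext s i
  congr 1
  funext s j
  dsimp only
  by_cases hX : gget g i j = 'X'
  · rw [if_pos hX, if_neg (by simp [hX])]
  · rw [if_neg hX]
    have hflag : ([(i, j - 1), (i - 1, j), (i - 1, j - 1)].foldl
        (fun fl (p : Nat × Nat) => if gget g p.1 p.2 ≠ gget g i j then false else fl) true) =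
        decide (gget g i (j - 1) = gget g i j ∧ gget g (i - 1) j = gget g i j ∧
          gget g (i - 1) (j - 1) = gget g i j) := by
      simp only [List.foldl_cons, List.foldl_nil]
      by_cases h1 : gget g i (j - 1) = gget g i j <;>
        by_cases h2 : gget g (i - 1) j = gget g i j <;>
        by_cases h3 : gget g (i - 1) (j - 1) = gget g i j <;>
        simp [h1, h2, h3]
    rw [hflag]
    by_cases hall : gget g i (j - 1) = gget g i j ∧ gget g (i - 1) j = gget g i j ∧
        gget g (i - 1) (j - 1) = gget g i j
    · rw [if_pos (by simp [hall]), if_pos ⟨hX, hall.1.symm,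
        hall.1.trans hall.2.1.symm, hall.2.1.trans hall.2.2.symm⟩]
      rfl
    · rw [if_neg (by simpa using hall), if_neg (fun hc => hall
        ⟨hc.2.1.symm, (hc.2.1.trans hc.2.2.1).symm, ((hc.2.1.trans hc.2.2.1).trans hc.2.2.2).symm⟩)]

lemma find4BlockA_none (m n : Int) (g : List (List Char))
    (h : (findB m n g).length = 0) : find4BlockA m n g = none := by
  unfold find4BlockA; rw [find_eq, if_pos h]

lemma find4BlockA_some (m n : Int) (g : List (List Char))
    (h : ¬ (findB m n g).length = 0) : find4BlockA m n g = some (findB m n g) := by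
  unfold find4BlockA; rw [find_eq, if_neg h]

lemma loopA_none (m n : Int) : ∀ (f : Nat) (a : Int) (g : List (List Char)),
    loopA m n f a g none = a := by
  intro f a g; cases f <;> rfl

-- ---------- the main loop ----------

lemma loop_eq (m n : Int) : ∀ (f : Nat) (a : Int) (g : List (List Char)),
    ShapeG m.toNat n.toNat g →
    loopB m n (f + 1) a g =
      loopA m n f (a + lenOptA (find4BlockA m n g)) g (find4BlockA m n g) := by
  intro f
  induction f with
  | zero =>
    intro a g hS
    rw [loopB]
    by_cases hE : (findB m n g).length = 0
    · rw [if_pos hE, find4BlockA_none m n g hE, loopA_none]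
      simp [lenOptA]
    · rw [if_neg hE, find4BlockA_some m n g hE]
      rfl
  | succ f ihf =>
    intro a g hS
    rw [loopB]
    by_cases hE : (findB m n g).length = 0
    · rw [if_pos hE, find4BlockA_none m n g hE, loopA_none]
      simp [lenOptA]
    · rw [if_neg hE, find4BlockA_some m n g hE]
      rw [show delectB = delectA from rfl]
      have hSd := shape_delect m.toNat n.toNat (findB m n g) g hS
      have hg2 : blockDownA m n (delectA (findB m n g) g) =
          gravityB m n (delectA (findB m n g) g) := blockDown_eq_gravity m n _ hSd
      show loopB m n (f + 1) (a + ((findB m n g).length : Int))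
          (gravityB m n (delectA (findB m n g) g)) = _
      rw [ihf _ _ (shape_gravity m n _ hSd), ← hg2]
      conv_rhs => rw [loopA]
      rfl

lemma find_small (m n : Int) (g : List (List Char)) (h : m ≤ 1 ∨ n ≤ 1) :
    findB m n g = [] := by
  have hconst : ∀ (l : List Nat) (s0 : PySem.Set (Nat × Nat)),
      l.foldl (fun s (_ : Nat) => s) s0 = s0 := by
    intro l
    induction l with
    | nil => intro s0; rfl
    | cons a l ih => intro s0; exact ih s0
  unfold findB
  rcases h with h | h
  · rw [show natRange1 m = [] by unfold natRange1; rw [show (m - 1).toNat = 0 by omega]; rfl]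
    rfl
  · rw [show natRange1 n = [] by unfold natRange1; rw [show (n - 1).toNat = 0 by omega]; rfl]
    simp only [List.foldl_nil]
    exact hconst _ _

-- ===== VERDICT (by name: the statement is the Claim_ definition above) =====
theorem solution_spec : Claim_equal_solution := by
  unfold Claim_equal_solution
  intro m n board _ hPre
  unfold Spec_solution solution solution_alt
  rcases hPre with hsmall | hshape
  · have hf : findB m n (board.map String.toList) = [] := find_small m n _ hsmall
    have hfa : find4BlockA m n (board.map String.toList) = none :=
      find4BlockA_none m n _ (by rw [hf]; rfl)
    show loopA m n (gridCells (board.map String.toList))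
        (lenOptA (find4BlockA m n (board.map String.toList)))
        (board.map String.toList) (find4BlockA m n (board.map String.toList)) =
      loopB m n (gridCells (board.map String.toList) + 1) 0 (board.map String.toList)
    rw [hfa, loopA_none, loopB, if_pos (by rw [hf]; rfl)]
    simp [lenOptA]
  · have hS : ShapeG m.toNat n.toNat (board.map String.toList) := by
      constructor
      · simpa using hshape.1
      · intro i hi
        have h2 := hshape.2 i hi
        have hib : i < board.length := by have := hshape.1; omega
        rw [List.getD_eq_getElem _ _ hib] at h2
        rw [List.getD_eq_getElem?_getD, List.getElem?_map, List.getElem?_eq_getElem hib]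
        simpa using h2
    show loopA m n (gridCells (board.map String.toList))
        (lenOptA (find4BlockA m n (board.map String.toList)))
        (board.map String.toList) (find4BlockA m n (board.map String.toList)) =
      loopB m n (gridCells (board.map String.toList) + 1) 0 (board.map String.toList)
    rw [loop_eq m n (gridCells (board.map String.toList)) 0 _ hS, zero_add]
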